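-- pv_equiv track=rewrite | github.com/mileoa/28tasks | ConquestCampaign/ConquestCampaign.py | conquer_surrounding_cells
-- ===== SOURCE A (Python) =====
-- def fill_polygon_soliders(
--     polygon: list[list[bool]], L: int, battalion: list[int]
-- ) -> list[list[bool]]:
--     for i in range(0, L * 2, 2):
--         # Use -1 because polygon has coordinates 1 ... N, 1 ... M
--         polygon[battalion[i] - 1][battalion[i + 1] - 1] = True
--     return polygon
--
-- def conquer_surrounding_cells(polygon: list[list[bool]]) -> list[list[bool]]:
--     result: list[int] = []
--     L: int = 0
--
--     for i, cell_row in enumerate(polygon, 1):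
--         for j, cell in enumerate(cell_row, 1):
--             if not cell:
--                 continue
--             # Check out of bounds.
--             if i - 1 >= 1:
--                 result.append(i - 1)
--                 result.append(j)
--                 L += 1
--             # Check out of bounds.
--             if i + 1 <= len(polygon):
--                 result.append(i + 1)
--                 result.append(j)
--                 L += 1
--             # Check out of bounds.
--             if j - 1 >= 1:
--                 result.append(i)
--                 result.append(j - 1)
--                 L += 1
--             # Check out of bounds.
--             if j + 1 <= len(polygon[0]):
--                 result.append(i)
--                 result.append(j + 1)
--                 L += 1
--
--     polygon = fill_polygon_soliders(polygon, L, result)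
--     return polygon
-- ===== SOURCE B (Python) =====
-- def conquer_surrounding_cells(polygon: list[list[bool]]) -> list[list[bool]]:
--     # Gather pass over a snapshot of the grid: a cell becomes True iff it or an
--     # in-bounds 4-neighbor was True in the original. Mutates polygon in place
--     # and returns the same object, like the original.
--     orig = [row[:] for row in polygon]
--     n = len(polygon)
--     m = len(polygon[0]) if polygon else 0
--     for i in range(n):
--         for j in range(m):
--             polygon[i][j] = (orig[i][j]
--                 or (i > 0 and orig[i - 1][j])
--                 or (i + 1 < n and orig[i + 1][j])
--                 or (j > 0 and orig[i][j - 1])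
--                 or (j + 1 < m and orig[i][j + 1]))
--     return polygon
-- ===== Notes on version B (the rewrite author's own statement) =====
-- stated objective: faster
-- what changed: A scatters: it collects the coordinates of every in-bounds 4-neighbor of each True cell into a flat list and then writes True at each collected coordinate; B gathers: it snapshots the grid and recomputes every cell in one pass as 'was True or had a True in-bounds 4-neighbor', with no intermediate coordinate list.
-- outside the precondition, e.g. on conquer_surrounding_cells([[False, False], [False]]): A returns [[False, False], [False]], B raises IndexError; on conquer_surrounding_cells([[], [False], [True]]): A returns [[], [True], [True]], B returns [[], [False], [True]]
import Mathlib
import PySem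

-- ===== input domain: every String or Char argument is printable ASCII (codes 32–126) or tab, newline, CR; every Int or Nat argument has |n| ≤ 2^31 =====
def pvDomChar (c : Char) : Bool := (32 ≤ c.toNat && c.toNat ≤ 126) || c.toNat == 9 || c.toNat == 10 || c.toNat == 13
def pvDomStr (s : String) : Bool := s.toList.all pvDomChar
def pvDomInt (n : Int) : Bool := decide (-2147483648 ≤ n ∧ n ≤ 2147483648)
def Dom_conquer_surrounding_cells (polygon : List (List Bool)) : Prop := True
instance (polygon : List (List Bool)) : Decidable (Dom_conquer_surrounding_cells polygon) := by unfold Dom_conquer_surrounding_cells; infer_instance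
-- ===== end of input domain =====

-- B replaces A's scatter pass (collect all neighbor coordinates of True cells into a
-- flat list, then write True at each) by a single gather pass reading a snapshot of the
-- grid; equivalence is about the RETURN value (both Pythons also mutate the argument).

-- ===== PORT A =====
-- polygon[r-1][c-1] = True  (coordinates are 1-based; in-range on all admitted inputs)
def pvSetTrue (g : List (List Bool)) (r c : Int) : List (List Bool) :=
  match g[(r - 1).toNat]? with
  | none => g
  | some row => g.set (r - 1).toNat (row.set (c - 1).toNat true)

-- for i in range(0, L*2, 2): polygon[battalion[i]-1][battalion[i+1]-1] = True
-- ported as the same iteration over battalion two entries at a time, L counting down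
def fill_polygon_soliders (polygon : List (List Bool)) (L : Int) (battalion : List Int) : List (List Bool) :=
  match battalion with
  | r :: c :: rest => if L ≤ 0 then polygon else fill_polygon_soliders (pvSetTrue polygon r c) (L - 1) rest
  | _ => polygon

-- the body of A's inner loop: the four guarded appends for one cell
def pvStepCell (n m : Int) (s : List Int × Int) (i j : Int) (cell : Bool) : List Int × Int :=
  if cell then
    let s1 := if 1 ≤ i - 1 then (s.1 ++ [i - 1, j], s.2 + 1) else s
    let s2 := if i + 1 ≤ n then (s1.1 ++ [i + 1, j], s1.2 + 1) else s1
    let s3 := if 1 ≤ j - 1 then (s2.1 ++ [i, j - 1], s2.2 + 1) else s2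
    if j + 1 ≤ m then (s3.1 ++ [i, j + 1], s3.2 + 1) else s3
  else s

def conquer_surrounding_cells (polygon : List (List Bool)) : List (List Bool) :=
  let n : Int := polygon.length
  let m : Int := (polygon.headI).length
  let s := (PySem.List.enumerate polygon 1).foldl
    (fun s p => (PySem.List.enumerate p.2 1).foldl (fun s q => pvStepCell n m s p.1 q.1 q.2) s)
    (([] : List Int), (0 : Int))
  fill_polygon_soliders polygon s.2 s.1

-- ===== PORT B =====
-- orig[i][j] read with bounds defaults (all reads are in range where used)
def pvNb (g : List (List Bool)) (i j : Nat) : Bool := (g.getD i []).getD j false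

def conquer_surrounding_cells_alt (polygon : List (List Bool)) : List (List Bool) :=
  let n := polygon.length
  let m := (polygon.headI).length
  (List.range n).map (fun i => (List.range m).map (fun j =>
    pvNb polygon i j
    || (decide (0 < i) && pvNb polygon (i - 1) j)
    || (decide (i + 1 < n) && pvNb polygon (i + 1) j)
    || (decide (0 < j) && pvNb polygon i (j - 1))
    || (decide (j + 1 < m) && pvNb polygon i (j + 1))))

-- ===== PRECONDITION & SPEC =====
-- Pre_ excludes ragged grids (rows of unequal length): there A's use of len(polygon[0])
-- as the column bound for every row makes it raise IndexError on most of them, and where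
-- it does return, the value is an accident of that bound; B's natural gather also raises
-- or differs there.
def Pre_conquer_surrounding_cells (polygon : List (List Bool)) : Prop :=
  ∀ row ∈ polygon, row.length = (polygon.headI).length
instance (polygon : List (List Bool)) : Decidable (Pre_conquer_surrounding_cells polygon) := by
  unfold Pre_conquer_surrounding_cells; infer_instance

def pvWitness_conquer_surrounding_cells : List (List Bool) := [[true, false], [false, false]]

def Spec_conquer_surrounding_cells (polygon : List (List Bool)) (out : List (List Bool)) : Prop := out = conquer_surrounding_cells_alt polygon
instance (polygon : List (List Bool)) (out : List (List Bool)) : Decidable (Spec_conquer_surrounding_cells polygon out) := by unfold Spec_conquer_surrounding_cells; infer_instance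

-- ===== CLAIM (what is proved, stated in full; the proofs are below) =====
def Claim_equal_conquer_surrounding_cells : Prop := ∀ (polygon : List (List Bool)), Dom_conquer_surrounding_cells polygon → Pre_conquer_surrounding_cells polygon → Spec_conquer_surrounding_cells polygon (conquer_surrounding_cells polygon)

-- ===== LEMMAS AND PROOFS =====

-- proof-side view of the coordinate list A builds: (row, col) pairs per cell
def pvFlat (ps : List (Int × Int)) : List Int := ps.flatMap (fun p => [p.1, p.2])
def pvPairsCell (n m i j : Int) : List (Int × Int) :=
  (if 1 ≤ i - 1 then [(i - 1, j)] else []) ++ (if i + 1 ≤ n then [(i + 1, j)] else [])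
  ++ (if 1 ≤ j - 1 then [(i, j - 1)] else []) ++ (if j + 1 ≤ m then [(i, j + 1)] else [])
def pvRowPairs (n m i : Int) (row : List Bool) (j0 : Int) : List (Int × Int) :=
  match row with
  | [] => []
  | c :: t => (if c then pvPairsCell n m i j0 else []) ++ pvRowPairs n m i t (j0 + 1)
def pvGridPairs (n m : Int) (rows : List (List Bool)) (i0 : Int) : List (Int × Int) :=
  match rows with
  | [] => []
  | r :: t => pvRowPairs n m i0 r 1 ++ pvGridPairs n m t (i0 + 1)

lemma pvStepCell_spec (n m : Int) (s : List Int × Int) (i j : Int) (cell : Bool) :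
    pvStepCell n m s i j cell =
      (s.1 ++ pvFlat (if cell then pvPairsCell n m i j else []),
       s.2 + ((if cell then pvPairsCell n m i j else []).length : Int)) := by
  cases cell <;> simp only [pvStepCell, pvPairsCell, pvFlat, if_true, if_false, Bool.false_eq_true]
  · simp
  · split_ifs <;> simp [List.append_assoc] <;> omega

lemma pvSetTrue_length (g : List (List Bool)) (r c : Int) : (pvSetTrue g r c).length = g.length := by
  unfold pvSetTrue; cases h : g[(r - 1).toNat]? <;> simp

lemma pvSetTrue_rect {m : Nat} {g : List (List Bool)} (hm : ∀ row ∈ g, row.length = m) (r c : Int) :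
    ∀ row ∈ pvSetTrue g r c, row.length = m := by
  intro row hrow
  unfold pvSetTrue at hrow
  cases h : g[(r - 1).toNat]? with
  | none => rw [h] at hrow; exact hm row hrow
  | some r0 =>
    rw [h] at hrow
    rcases List.mem_or_eq_of_mem_set hrow with h2 | h2
    · exact hm row h2
    · subst h2; simpa using hm r0 (List.mem_of_getElem? h)

lemma pvRowCollect (n m i : Int) (row : List Bool) (j0 : Int) (a : List Int × Int) :
    (PySem.List.enumerate row j0).foldl (fun s q => pvStepCell n m s i q.1 q.2) a
      = (a.1 ++ pvFlat (pvRowPairs n m i row j0), a.2 + ((pvRowPairs n m i row j0).length : Int)) := by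
  induction row generalizing j0 a with
  | nil => simp [PySem.List.enumerate_nil, pvRowPairs, pvFlat]
  | cons c t ih =>
    rw [PySem.List.enumerate_cons, List.foldl_cons, pvStepCell_spec, ih]
    simp [pvRowPairs, pvFlat, List.flatMap_append, List.append_assoc]
    omega


lemma pvGridCollect (n m : Int) (rows : List (List Bool)) (i0 : Int) (a : List Int × Int) :
    (PySem.List.enumerate rows i0).foldl
        (fun s p => (PySem.List.enumerate p.2 1).foldl (fun s q => pvStepCell n m s p.1 q.1 q.2) s) a
      = (a.1 ++ pvFlat (pvGridPairs n m rows i0), a.2 + ((pvGridPairs n m rows i0).length : Int)) := by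
  induction rows generalizing i0 a with
  | nil => simp [PySem.List.enumerate_nil, pvGridPairs, pvFlat]
  | cons r t ih =>
    rw [PySem.List.enumerate_cons, List.foldl_cons, pvRowCollect, ih]
    simp [pvGridPairs, pvFlat, List.flatMap_append, List.append_assoc]
    omega


lemma pvFill_flat (ps : List (Int × Int)) (g : List (List Bool)) :
    fill_polygon_soliders g (ps.length : Int) (pvFlat ps)
      = ps.foldl (fun h p => pvSetTrue h p.1 p.2) g := by
  induction ps generalizing g with
  | nil => simp [pvFlat, fill_polygon_soliders]
  | cons p ps ih =>
    have : pvFlat (p :: ps) = p.1 :: p.2 :: pvFlat ps := by simp [pvFlat]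
    rw [this]
    simp only [fill_polygon_soliders, List.length_cons]
    rw [if_neg (by push_cast; omega)]
    have h1 : ((ps.length + 1 : Nat) : Int) - 1 = (ps.length : Int) := by push_cast; omega
    rw [h1, ih]
    rfl

lemma pvSetTrue_cell {g : List (List Bool)} {m : Nat} (hm : ∀ row ∈ g, row.length = m)
    {r c : Int} (hr : 1 ≤ r) (hrn : r ≤ (g.length : Int)) (hc : 1 ≤ c) (hcm : c ≤ (m : Int))
    (i j : Nat) :
    pvNb (pvSetTrue g r c) i j = (pvNb g i j || decide (r = (i : Int) + 1 ∧ c = (j : Int) + 1)) := by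
  have hk : (r - 1).toNat < g.length := by omega
  have hrow : g[(r - 1).toNat]? = some g[(r - 1).toNat] := List.getElem?_eq_getElem hk
  unfold pvSetTrue
  rw [hrow]
  simp only [pvNb, List.getD_eq_getElem?_getD, List.getElem?_set]
  by_cases hri : (r - 1).toNat = i
  · have hrieq : r = (i : Int) + 1 := by omega
    rw [if_pos hri, if_pos (by omega)]
    have hlen : g[(r-1).toNat].length = m := hm _ (List.getElem_mem hk)
    rw [← hri, hrow]
    simp only [Option.getD_some, List.getElem?_set]
    by_cases hcj : (c - 1).toNat = j
    · have hcjeq : c = (j : Int) + 1 := by omega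
      rw [if_pos hcj, if_pos (by omega)]
      simp [hrieq, hcjeq]
    · have : ¬ (c = (j : Int) + 1) := by omega
      rw [if_neg hcj]
      simp [this]
  · have : ¬ (r = (i : Int) + 1) := by omega
    rw [if_neg hri]
    simp [this]


lemma pvFoldSet_length (ps : List (Int × Int)) (g : List (List Bool)) :
    (ps.foldl (fun h p => pvSetTrue h p.1 p.2) g).length = g.length := by
  induction ps generalizing g with
  | nil => rfl
  | cons p ps ih => rw [List.foldl_cons, ih, pvSetTrue_length]


lemma pvFoldSet_rect {m : Nat} (ps : List (Int × Int)) {g : List (List Bool)}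
    (hm : ∀ row ∈ g, row.length = m) :
    ∀ row ∈ ps.foldl (fun h p => pvSetTrue h p.1 p.2) g, row.length = m := by
  induction ps generalizing g with
  | nil => exact hm
  | cons p ps ih => exact ih (pvSetTrue_rect hm p.1 p.2)


lemma pvFoldSet_cell {m : Nat} (ps : List (Int × Int)) {g : List (List Bool)}
    (hm : ∀ row ∈ g, row.length = m)
    (hb : ∀ p ∈ ps, 1 ≤ p.1 ∧ p.1 ≤ (g.length : Int) ∧ 1 ≤ p.2 ∧ p.2 ≤ (m : Int))
    (i j : Nat) :
    pvNb (ps.foldl (fun h p => pvSetTrue h p.1 p.2) g) i j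
      = (pvNb g i j || decide (((i : Int) + 1, (j : Int) + 1) ∈ ps)) := by
  induction ps generalizing g with
  | nil => simp
  | cons p ps ih =>
    obtain ⟨h1, h2, h3, h4⟩ := hb p List.mem_cons_self
    rw [List.foldl_cons,
      ih (pvSetTrue_rect hm p.1 p.2)
        (by intro q hq; have := hb q (List.mem_cons_of_mem _ hq); rwa [pvSetTrue_length]),
      pvSetTrue_cell hm h1 h2 h3 h4]
    simp only [List.mem_cons]
    have : (p = ((i:Int)+1, (j:Int)+1)) ↔ (p.1 = (i:Int)+1 ∧ p.2 = (j:Int)+1) := by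
      constructor
      · intro h; rw [h]; exact ⟨rfl, rfl⟩
      · intro ⟨ha, hb⟩; exact Prod.ext ha hb
    simp [this, Bool.or_assoc, eq_comm]

lemma pvMem_ite_singleton (c : Prop) [Decidable c] (x p : Int × Int) :
    p ∈ (if c then [x] else []) ↔ c ∧ p = x := by
  split_ifs <;> simp_all


lemma pvMem_pairsCell (n m a b : Int) (p : Int × Int) :
    p ∈ pvPairsCell n m a b ↔
      (1 ≤ a - 1 ∧ p = (a - 1, b)) ∨ (a + 1 ≤ n ∧ p = (a + 1, b))
      ∨ (1 ≤ b - 1 ∧ p = (a, b - 1)) ∨ (b + 1 ≤ m ∧ p = (a, b + 1)) := by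
  simp only [pvPairsCell, List.mem_append, pvMem_ite_singleton]
  tauto


lemma pvMem_rowPairs (n m i : Int) (row : List Bool) (j0 : Int) (p : Int × Int) :
    p ∈ pvRowPairs n m i row j0 ↔
      ∃ k : Nat, ∃ h : k < row.length, row[k] = true ∧ p ∈ pvPairsCell n m i (j0 + k) := by
  induction row generalizing j0 with
  | nil => simp [pvRowPairs]
  | cons c t ih =>
    simp only [pvRowPairs, List.mem_append, ih]
    constructor
    · rintro (h | ⟨k, hk, hc, hp⟩)
      · split_ifs at h with hc
        · exact ⟨0, by simp, by simp [hc], by simpa using h⟩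
        · simp at h
      · exact ⟨k + 1, by simpa using hk, by simpa using hc,
          by rw [show (j0 + (((k : Nat) + 1 : Nat) : Int)) = j0 + 1 + (k : Int) by push_cast; ring]; exact hp⟩
    · rintro ⟨k, hk, hc, hp⟩
      cases k with
      | zero => left; simp at hc hp ⊢; simp [hc]; simpa using hp
      | succ k => right; exact ⟨k, by simpa using hk, by simpa using hc,
          by rwa [show j0 + ((k : Nat) + 1 : Nat) = j0 + 1 + (k : Int) by push_cast; ring] at hp⟩


lemma pvMem_gridPairs (n m : Int) (rows : List (List Bool)) (i0 : Int) (p : Int × Int) :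
    p ∈ pvGridPairs n m rows i0 ↔
      ∃ r : Nat, ∃ h : r < rows.length, p ∈ pvRowPairs n m (i0 + r) rows[r] 1 := by
  induction rows generalizing i0 with
  | nil => simp [pvGridPairs]
  | cons row t ih =>
    simp only [pvGridPairs, List.mem_append, ih]
    constructor
    · rintro (h | ⟨r, hr, hp⟩)
      · exact ⟨0, by simp, by simpa using h⟩
      · refine ⟨r + 1, by simpa using hr, ?_⟩
        rw [List.getElem_cons_succ,
          show (i0 + (((r : Nat) + 1 : Nat) : Int)) = i0 + 1 + (r : Int) by push_cast; ring]
        exact hp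
    · rintro ⟨r, hr, hp⟩
      cases r with
      | zero => left; simpa using hp
      | succ r => right; exact ⟨r, by simpa using hr, by
          rwa [show i0 + ((r : Nat) + 1 : Nat) = i0 + 1 + (r : Int) by push_cast; ring] at hp⟩


lemma pvGridPairs_bounds {n m : Int} {rows : List (List Bool)} {i0 : Int}
    (hm : ∀ row ∈ rows, (row.length : Int) = m) (h1 : 1 ≤ i0) (h2 : i0 + rows.length ≤ n + 1) :
    ∀ p ∈ pvGridPairs n m rows i0, 1 ≤ p.1 ∧ p.1 ≤ n ∧ 1 ≤ p.2 ∧ p.2 ≤ m := by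
  intro p hp
  rw [pvMem_gridPairs] at hp
  obtain ⟨r, hr, hp⟩ := hp
  rw [pvMem_rowPairs] at hp
  obtain ⟨k, hk, hc, hp⟩ := hp
  have hrowlen : ((rows[r].length : Nat) : Int) = m := hm _ (List.getElem_mem hr)
  rw [pvMem_pairsCell] at hp
  rcases hp with ⟨hg, he⟩ | ⟨hg, he⟩ | ⟨hg, he⟩ | ⟨hg, he⟩ <;> subst he <;> simp <;> omega


lemma pvNb_eq {g : List (List Bool)} {i j : Nat} (hi : i < g.length) (hj : j < g[i].length) :
    pvNb g i j = g[i][j] := by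
  simp [pvNb, List.getD_eq_getElem?_getD, List.getElem?_eq_getElem hi, List.getElem?_eq_getElem hj]

lemma pvMem_neighbors {P : List (List Bool)} {m : Nat} (hm : ∀ row ∈ P, row.length = m)
    {i j : Nat} (hi : i < P.length) (hj : j < m) :
    (((i : Int) + 1, (j : Int) + 1) ∈ pvGridPairs (P.length : Int) (m : Int) P 1) ↔
      ((0 < i ∧ pvNb P (i - 1) j = true) ∨ (i + 1 < P.length ∧ pvNb P (i + 1) j = true)
       ∨ (0 < j ∧ pvNb P i (j - 1) = true) ∨ (j + 1 < m ∧ pvNb P i (j + 1) = true)) := by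
  rw [pvMem_gridPairs]
  constructor
  · rintro ⟨r, hr, hp⟩
    rw [pvMem_rowPairs] at hp
    obtain ⟨k, hk, hc, hp⟩ := hp
    have hkm : k < m := by have := hm _ (List.getElem_mem hr); omega
    have cellrk : pvNb P r k = true := by rw [pvNb_eq hr hk]; exact hc
    rw [pvMem_pairsCell] at hp
    rcases hp with ⟨hg, he⟩ | ⟨hg, he⟩ | ⟨hg, he⟩ | ⟨hg, he⟩ <;>
      rw [Prod.mk.injEq] at he <;> obtain ⟨h1, h2⟩ := he
    · refine Or.inr (Or.inl ⟨by omega, ?_⟩)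
      have hr' : r = i + 1 := by omega
      have hk' : k = j := by omega
      rw [← hr', ← hk']; exact cellrk
    · refine Or.inl ⟨by omega, ?_⟩
      have hr' : r = i - 1 := by omega
      have hk' : k = j := by omega
      rw [← hr', ← hk']; exact cellrk
    · refine Or.inr (Or.inr (Or.inr ⟨by omega, ?_⟩))
      have hr' : r = i := by omega
      have hk' : k = j + 1 := by omega
      rw [← hr', ← hk']; exact cellrk
    · refine Or.inr (Or.inr (Or.inl ⟨by omega, ?_⟩))
      have hr' : r = i := by omega
      have hk' : k = j - 1 := by omega
      rw [← hr', ← hk']; exact cellrk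
  · have mk : ∀ (r k : Nat), r < P.length → k < m → pvNb P r k = true →
        ((i : Int) + 1, (j : Int) + 1) ∈ pvPairsCell (P.length : Int) (m : Int) (1 + (r : Int)) (1 + (k : Int)) →
        ∃ r' : Nat, ∃ h : r' < P.length, ((i : Int) + 1, (j : Int) + 1) ∈ pvRowPairs (P.length : Int) (m : Int) (1 + (r' : Int)) P[r'] 1 := by
      intro r k hr hk hcl hmem
      refine ⟨r, hr, ?_⟩
      rw [pvMem_rowPairs]
      have hlen : P[r].length = m := hm _ (List.getElem_mem hr)
      exact ⟨k, by omega, by rw [← pvNb_eq hr (by omega)]; exact hcl, hmem⟩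
    rintro (⟨hlt, hcl⟩ | ⟨hlt, hcl⟩ | ⟨hlt, hcl⟩ | ⟨hlt, hcl⟩)
    · exact mk (i - 1) j (by omega) hj hcl (by
        rw [pvMem_pairsCell]
        refine Or.inr (Or.inl ⟨by omega, ?_⟩)
        rw [Prod.mk.injEq]; omega)
    · exact mk (i + 1) j (by omega) hj hcl (by
        rw [pvMem_pairsCell]
        refine Or.inl ⟨by omega, ?_⟩
        rw [Prod.mk.injEq]; omega)
    · exact mk i (j - 1) hi (by omega) hcl (by
        rw [pvMem_pairsCell]
        refine Or.inr (Or.inr (Or.inr ⟨by omega, ?_⟩))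
        rw [Prod.mk.injEq]; omega)
    · exact mk i (j + 1) hi (by omega) hcl (by
        rw [pvMem_pairsCell]
        refine Or.inr (Or.inr (Or.inl ⟨by omega, ?_⟩))
        rw [Prod.mk.injEq]; omega)

lemma pvMain (polygon : List (List Bool))
    (hpre : ∀ row ∈ polygon, row.length = (polygon.headI).length) :
    conquer_surrounding_cells polygon = conquer_surrounding_cells_alt polygon := by
  set m := (polygon.headI).length with hm
  set P := pvGridPairs (polygon.length : Int) (m : Int) polygon 1 with hP
  have hA : conquer_surrounding_cells polygon = P.foldl (fun h p => pvSetTrue h p.1 p.2) polygon := by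
    show fill_polygon_soliders polygon _ _ = _
    rw [pvGridCollect]
    simp only [List.nil_append, zero_add]
    exact pvFill_flat P polygon
  rw [hA]
  have hb := pvGridPairs_bounds (n := (polygon.length : Int)) (m := (m : Int)) (i0 := 1)
    (by intro row hrow; exact_mod_cast hpre row hrow) (by omega) (by omega)
  apply List.ext_getElem
  · rw [pvFoldSet_length]
    simp [conquer_surrounding_cells_alt]
  · intro i h1 h2
    have hi : i < polygon.length := by rwa [pvFoldSet_length] at h1
    have hrowlen : ((P.foldl (fun h p => pvSetTrue h p.1 p.2) polygon)[i]).length = m :=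
      pvFoldSet_rect P hpre _ (List.getElem_mem h1)
    apply List.ext_getElem
    · rw [hrowlen]
      simp only [conquer_surrounding_cells_alt, List.getElem_map, List.getElem_range, List.length_map, List.length_range]
      exact hm
    · intro j hj1 hj2
      have hjm : j < m := by omega
      have lhs : (P.foldl (fun h p => pvSetTrue h p.1 p.2) polygon)[i][j]
          = pvNb (P.foldl (fun h p => pvSetTrue h p.1 p.2) polygon) i j := by
        rw [pvNb_eq h1 hj1]
      rw [lhs, pvFoldSet_cell P hpre (by intro p hp; exact hb p hp) i j]
      simp only [conquer_surrounding_cells_alt, List.getElem_map, List.getElem_range]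
      apply Bool.eq_iff_iff.mpr
      simp only [Bool.or_eq_true, Bool.and_eq_true, decide_eq_true_eq]
      rw [hP, pvMem_neighbors hpre hi hjm]
      tauto

-- ===== VERDICT (by name: the statement is the Claim_ definition above) =====
theorem conquer_surrounding_cells_spec : Claim_equal_conquer_surrounding_cells := by
  intro polygon _ hpre
  unfold Spec_conquer_surrounding_cells
  exact pvMain polygon hpre
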